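-- pv_equiv track=rewrite | github.com/GoldSurfer2/pdf-extraction | main.py | remove_meta_info
-- ===== SOURCE A (Python) =====
-- def remove_meta_info(text):
--     lines = text.split('\n')
--     # 제목은 첫 줄, 그 다음부터 'K'가 단독으로 나오는 줄까지 제거
--     new_lines = [lines[0]]
--     k_found = False
--     for line in lines[1:]:
--         if not k_found:
--             if line.strip() == 'K':
--                 k_found = True
--                 continue  # 'K' 줄까지 모두 제거, 해당 줄도 포함
--         if k_found:
--             new_lines.append(line)
--     return '\n'.join(new_lines)
-- ===== SOURCE B (Python) =====
-- def remove_meta_info(text):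
--     lines = text.split('\n')
--     head, rest = lines[0], lines[1:]
--     for i, line in enumerate(rest):
--         if line.strip() == 'K':
--             return '\n'.join([head] + rest[i + 1:])
--     return head
-- ===== Notes on version B (the rewrite author's own statement) =====
-- stated objective: simpler
-- what changed: Replaces A's flag-threaded per-line filter with locating the first standalone 'K' line and returning the head joined with the slice after it (early return; no boolean state).
import Mathlib
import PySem

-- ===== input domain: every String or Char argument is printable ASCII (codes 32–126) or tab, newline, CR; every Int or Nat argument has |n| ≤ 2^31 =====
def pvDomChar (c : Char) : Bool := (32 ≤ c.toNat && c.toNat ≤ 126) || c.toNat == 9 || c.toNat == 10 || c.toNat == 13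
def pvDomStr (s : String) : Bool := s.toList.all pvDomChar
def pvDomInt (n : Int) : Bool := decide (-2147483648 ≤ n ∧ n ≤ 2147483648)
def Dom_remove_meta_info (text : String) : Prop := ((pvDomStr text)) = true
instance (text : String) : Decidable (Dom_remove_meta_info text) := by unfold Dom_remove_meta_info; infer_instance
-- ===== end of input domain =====

-- B replaces A's flag-threaded filter loop with locate-the-'K'-line-then-slice (simpler decomposition; same cost).

-- ===== PORT A =====
-- loop body: 'if not k_found: if strip=='K': continue;  if k_found: append'
def pvAStep (st : List String × Bool) (line : String) : List String × Bool :=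
  if st.2 = false then
    if PySem.Str.strip line = "K" then (st.1, true)
    else (if st.2 then (st.1 ++ [line], st.2) else st)
  else (if st.2 then (st.1 ++ [line], st.2) else st)

def remove_meta_info (text : String) : String :=
  let lines := (PySem.Str.split? text "\n").getD []   -- text.split('\n'); sep ≠ "" so split? is some
  -- lines[0]: split('\n') always returns at least one piece, so the IndexError branch is unreachable
  let first := (PySem.List.pyGet? lines 0).getD ""
  let res := (PySem.List.slice lines (some 1) none).foldl pvAStep ([first], false)
  PySem.Str.join "\n" res.1

-- ===== PORT B =====
-- 'for i, line in enumerate(rest): if line.strip()=="K": return "\n".join([head]+rest[i+1:]); return head'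
def pvBFind (head : String) : List String → String
  | [] => head
  | l :: rest =>
    if PySem.Str.strip l = "K" then PySem.Str.join "\n" (head :: rest)
    else pvBFind head rest

def remove_meta_info_alt (text : String) : String :=
  let lines := (PySem.Str.split? text "\n").getD []
  let head := (PySem.List.pyGet? lines 0).getD ""
  pvBFind head (PySem.List.slice lines (some 1) none)

-- ===== PRECONDITION & SPEC =====
def Spec_remove_meta_info (text : String) (out : String) : Prop := out = remove_meta_info_alt text
instance (text : String) (out : String) : Decidable (Spec_remove_meta_info text out) := by unfold Spec_remove_meta_info; infer_instance

-- ===== CLAIM (what is proved, stated in full; the proofs are below) =====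
def Claim_equal_remove_meta_info : Prop := ∀ (text : String), Dom_remove_meta_info text → Spec_remove_meta_info text (remove_meta_info text)

-- ===== LEMMAS AND PROOFS =====

-- once k_found is true, A's loop appends every remaining line
theorem pvAStep_found (rest : List String) (acc : List String) :
    rest.foldl pvAStep (acc, true) = (acc ++ rest, true) := by
  induction rest generalizing acc with
  | nil => simp
  | cons l rest ih => simp [pvAStep, ih, List.append_assoc]

-- A's whole loop, joined, is B's locate-and-slice
theorem pvA_eq_pvBFind (rest : List String) (head : String) :
    PySem.Str.join "\n" (rest.foldl pvAStep ([head], false)).1 = pvBFind head rest := by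
  induction rest with
  | nil =>
    simp [pvBFind, PySem.Str.join, PySem.Chars.join_singleton]
  | cons l rest ih =>
    by_cases h : PySem.Str.strip l = "K"
    · simp [pvBFind, h, pvAStep, pvAStep_found]
    · simp [pvBFind, h, pvAStep, ih]

-- ===== VERDICT (by name: the statement is the Claim_ definition above) =====
theorem remove_meta_info_spec : Claim_equal_remove_meta_info := by
  intro text _
  unfold Spec_remove_meta_info remove_meta_info remove_meta_info_alt
  exact pvA_eq_pvBFind _ _
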